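-- pv_equiv track=rewrite | github.com/jvaldesh/data_science | 01_introduccion_a_la_programacion_con_python/S04/letra_x.py | letra_x
-- ===== SOURCE A (Python) =====
-- def letra_x(n):
--     letra = ""
--
--     for i in range(n):
--         for j in range(n):
--             if j == i or j == n - 1 - i:
--                 letra += "*"
--             else:
--                 letra += " "
--
--         letra += "\n"
--
--     return letra
-- ===== SOURCE B (Python) =====
-- def letra_x(n):
--     out = []
--     for i in range(n):
--         row = [" "] * n
--         row[i] = "*"
--         row[n - 1 - i] = "*"
--         out.append("".join(row) + "\n")
--     return "".join(out)
-- ===== Notes on version B (the rewrite author's own statement) =====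
-- stated objective: simpler
-- what changed: B builds each row as a list of n spaces and writes the two '*' marks directly at indices i and n-1-i, eliminating A's inner per-column scan with its conditional, and joins rows via a list instead of repeated string concatenation.
import Mathlib
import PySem

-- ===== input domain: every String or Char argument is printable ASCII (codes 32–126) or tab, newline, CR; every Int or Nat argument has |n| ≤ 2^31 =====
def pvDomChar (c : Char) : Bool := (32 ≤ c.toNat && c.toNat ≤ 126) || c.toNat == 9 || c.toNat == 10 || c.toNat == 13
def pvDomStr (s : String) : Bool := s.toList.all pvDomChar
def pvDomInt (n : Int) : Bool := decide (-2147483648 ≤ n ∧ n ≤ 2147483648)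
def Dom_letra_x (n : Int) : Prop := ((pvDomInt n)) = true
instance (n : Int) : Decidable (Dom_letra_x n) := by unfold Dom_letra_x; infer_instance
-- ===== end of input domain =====

-- B replaces A's inner per-column scan by direct index placement of the two '*' marks per row (objective: simpler).

-- ===== PORT A =====
def letra_x (n : Int) : String :=
  String.ofList ((PySem.List.pyRange 0 n 1).foldl (fun letra i =>
    ((PySem.List.pyRange 0 n 1).foldl (fun letra j =>
      if j == i || j == n - 1 - i then letra ++ ['*'] else letra ++ [' ']) letra) ++ ['\n']) [])

-- ===== PORT B =====
def letra_x_alt (n : Int) : String :=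
  String.ofList (((PySem.List.pyRange 0 n 1).map (fun i =>
    (((List.replicate n.toNat ' ').set i.toNat '*').set (n - 1 - i).toNat '*') ++ ['\n'])).flatten)

-- ===== PRECONDITION & SPEC =====
def Spec_letra_x (n : Int) (out : String) : Prop := out = letra_x_alt n
instance (n : Int) (out : String) : Decidable (Spec_letra_x n out) := by unfold Spec_letra_x; infer_instance

-- ===== CLAIM (what is proved, stated in full; the proofs are below) =====
def Claim_equal_letra_x : Prop := ∀ (n : Int), Dom_letra_x n → Spec_letra_x n (letra_x n)

-- ===== LEMMAS AND PROOFS =====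

-- The set-built row of B equals the map-built row A's inner loop produces.
lemma row_eq (n i : Int) (hi0 : 0 ≤ i) (hin : i < n) :
    (PySem.List.pyRange 0 n 1).map (fun j => if j == i || j == n - 1 - i then '*' else ' ')
      = ((List.replicate n.toNat ' ').set i.toNat '*').set (n - 1 - i).toNat '*' := by
  apply List.ext_getElem
  · simp [PySem.List.length_pyRange_one]
  · intro k h1 h2
    have hk : k < n.toNat := by simpa using h2
    rw [List.getElem_map, PySem.List.getElem_pyRange_one]
    rw [List.getElem_set, List.getElem_set, List.getElem_replicate]
    have hni : 0 ≤ n - 1 - i := by omega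
    by_cases h3 : (0 + (k : Int)) = n - 1 - i
    · have : (n - 1 - i).toNat = k := by omega
      simp [this, h3]
    · have hne : (n - 1 - i).toNat ≠ k := by omega
      by_cases h4 : (0 + (k : Int)) = i
      · have : i.toNat = k := by omega
        simp [this, h4, hne]
      · have hne2 : i.toNat ≠ k := by omega
        simp [hne, hne2]
        exact ⟨by omega, by omega⟩

lemma inner_eq (n i : Int) (acc : List Char) :
    (PySem.List.pyRange 0 n 1).foldl (fun letra j =>
      if j == i || j == n - 1 - i then letra ++ ['*'] else letra ++ [' ']) acc
    = acc ++ (PySem.List.pyRange 0 n 1).map (fun j => if j == i || j == n - 1 - i then '*' else ' ') := by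
  rw [PySem.List.foldl_congr_mem (g := fun letra j =>
      letra ++ [if j == i || j == n - 1 - i then '*' else ' '])]
  · exact PySem.List.foldl_append_singleton_eq_map _ _ _
  · intro acc x _; split_ifs <;> rfl

-- ===== VERDICT (by name: the statement is the Claim_ definition above) =====
theorem letra_x_spec : Claim_equal_letra_x := by
  intro n _
  unfold Spec_letra_x letra_x letra_x_alt
  congr 1
  have : ∀ letra i, ((PySem.List.pyRange 0 n 1).foldl (fun letra j =>
      if j == i || j == n - 1 - i then letra ++ ['*'] else letra ++ [' ']) letra) ++ ['\n']
      = letra ++ ((PySem.List.pyRange 0 n 1).map (fun j =>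
          if j == i || j == n - 1 - i then '*' else ' ') ++ ['\n']) := by
    intro letra i; rw [inner_eq]; simp
  rw [PySem.List.foldl_congr_mem (PySem.List.pyRange 0 n 1) _
      (fun letra i =>
        letra ++ ((PySem.List.pyRange 0 n 1).map (fun j =>
          if j == i || j == n - 1 - i then '*' else ' ') ++ ['\n'])) []
      (fun acc x _ => this acc x)]
  rw [PySem.List.foldl_append_eq_flatMap]
  rw [List.flatMap_def]
  simp only [List.nil_append]
  congr 1
  apply List.map_congr_left
  intro i hi
  have := (PySem.List.mem_pyRange_one).1 hi
  rw [row_eq n i this.1 this.2]
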